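/- GENERATED by mk_final_copies.py from the proof of the farm's unit `decode_residue.8` (farm:decode_residue.8.1: Lemmas.lean) as the
   re-elaboration sweep compiled it — do not edit. -/
/-
  LEMMAS OF THE UNIT `decode_residue.8` (path B control of decode_residue: the pass loop 2257, the `while` 2259, the i-loop
  2278's head and latch, the hand-overs to the j-loops 2261 / 2279, `++class_set`).

  The segment has three entries and five exits, and its three loop heads (0x10eeba, 0x10eed9, 0x10faa1) lie INSIDE it. It is
  proved as six straight-line walks between cut points, composed by `ReachVia.trans` in Proof.lean:

      entry1  At5  → A6 0                         entry2  At29 → A35 0 cs 0 pcount          entry3  At34 → A35 pass cs (i+1) (pcount+1)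
      head6   A6   → At36 ∨ A7 pass 0 0           head7   A7   → A6 (pass+1) ∨ At28 ∨ A35    head35  A35  → At30 ∨ A7 pass (cs+1) pcount

  `A6`, `A7`, `A35` are this unit's own assertions at the three inner loop heads. Every store of the segment goes into one of six
  scratch slots of the own frame (`scratch`); `common_scratch` carries COMMON over such stores once and for all, `fill_scratch` /
  `winner_scratch` / `winv_scratch` the content invariants.
-/
import Asan.CheckWalk
import Vorbis.Spec.Units.decode_residue_8
open X86 X86.User Asan Vorbis Vorbis.Spec Vorbis.Spec.DecodeResidue

set_option maxRecDepth 4000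
set_option maxHeartbeats 4000000

namespace Vorbis.Spec.decode_residue_8

/-- The scratch slots of path B's control code, as windows below the entry stack pointer `R` (= RA):
`[rbp−0xf0]`, `[rbp−0xec]` (one window), `[rbp−0xdc]`, `[rbp−0xc8]` (8 bytes), `[rbp−0xb8]`, `[rbp−0x98]`.
Every store of segment 8 goes into one of them; no constant slot of `Common` meets them. -/
def scratch (R : Nat) : List Span :=
  [⟨R - 248, R - 240⟩, ⟨R - 228, R - 224⟩, ⟨R - 208, R - 200⟩, ⟨R - 192, R - 188⟩, ⟨R - 160, R - 156⟩]

/-- The address of a stack slot below the entry stack pointer, as a number. -/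
theorem toNat_slot (x kw : Word) (hk : kw.toNat ≤ x.toNat) : (x - kw).toNat = x.toNat - kw.toNat := by
  have hle : kw ≤ x := by
    rw [UInt64.le_iff_toNat_le]
    exact hk
  exact UInt64.toNat_sub_of_le _ _ hle

/-- **A slot of the frame that is not a scratch slot reads the same** after stores into the scratch slots. `kw` (= `k`) is
the distance below the entry stack pointer, `n` the size; the five conditions say the slot misses the five windows. -/
theorem slot_keep {m m' : Mem} {x : Word} (hlo : 0x700000 + 848 ≤ x.toNat) (hhi : x.toNat + 8 ≤ 0x800000)
    (hs : Mem.SameExcept (scratch x.toNat) m m') (kw : Word) (k n : Nat) (hkw : kw.toNat = k) (hk : k ≤ 848) (hn : n ≤ k)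
    (hoff : (k ≤ 240 ∨ 248 + n ≤ k) ∧ (k ≤ 224 ∨ 228 + n ≤ k) ∧ (k ≤ 200 ∨ 208 + n ≤ k) ∧ (k ≤ 188 ∨ 192 + n ≤ k) ∧
      (k ≤ 156 ∨ 160 + n ≤ k)) :
    m'.readLE (x - kw) n = m.readLE (x - kw) n := by
  have e := toNat_slot x kw (by omega)
  rw [hkw] at e
  obtain ⟨h1, h2, h3, h4, h5⟩ := hoff
  apply hs.readLE _ _ (by omega)
  intro w hw
  simp only [scratch, List.mem_cons, List.mem_nil_iff, or_false] at hw
  rw [e]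
  rcases hw with rfl | rfl | rfl | rfl | rfl
  · simp only []
    omega
  · simp only []
    omega
  · simp only []
    omega
  · simp only []
    omega
  · simp only []
    omega

/-- Everything that lies off the stack region reads the same after stores into the scratch slots. -/
theorem scratch_off {R : Nat} (hlo : 0x700000 + 848 ≤ R) (hhi : R + 8 ≤ 0x800000) {lo hi : Nat}
    (h : hi ≤ 0x700000 ∨ 0x800000 ≤ lo) : ∀ w, w ∈ scratch R → hi ≤ w.lo ∨ w.hi ≤ lo := by
  intro w hw
  simp only [scratch, List.mem_cons, List.mem_nil_iff, or_false] at hw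
  rcases hw with rfl | rfl | rfl | rfl | rfl
  · simp only []
    omega
  · simp only []
    omega
  · simp only []
    omega
  · simp only []
    omega
  · simp only []
    omega

/-- A number below `2^31` is its own signed 32-bit value (the branch conditions `jl` / `jge` / `jg` compare these). -/
theorem toInt_small32 (n : Nat) (h : n < 2 ^ 31) : (BitVec.ofNat 32 n).toInt = (n : Int) := by
  rw [BitVec.toInt_eq_toNat_cond, BitVec.toNat_ofNat]
  have e : n % 2 ^ 32 = n := Nat.mod_eq_of_lt (by omega)
  rw [e]
  split
  · rfl
  · omega

/-- A number below `2^32` is its own 32-bit value (the value a 4-byte store writes). -/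
theorem toNat_small32 (n : Nat) (h : n < 2 ^ 32) : (BitVec.ofNat 32 n).toNat = n := by
  rw [BitVec.toNat_ofNat]
  exact Nat.mod_eq_of_lt h

/-- `add r32, 1` on a number. -/
theorem ofNat32_succ (n : Nat) : BitVec.ofNat 32 n + 1#32 = BitVec.ofNat 32 (n + 1) := by
  rw [BitVec.ofNat_add]

/-- What a 4-byte load reads back from a 4-byte store of a number below `2^32`. -/
theorem stored32 (n : Nat) (h : n < 2 ^ 32) : (BitVec.ofNat 32 n).toNat % 4294967296 = n := by
  rw [toNat_small32 n h]
  exact Nat.mod_eq_of_lt h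

/-- `setl` + `test` + `jne`: the arm where the byte is not 0 is the arm `a < b`. -/
theorem lt_of_setl {a b : Nat} (ha : a < 2 ^ 31) (hb : b < 2 ^ 31)
    (h : ¬ (if (BitVec.ofNat 32 a).toInt < (BitVec.ofNat 32 b).toInt then 1 else 0 : BitVec 8).toNat = 0) : a < b := by
  rw [toInt_small32 a ha, toInt_small32 b hb] at h
  split at h
  · omega
  · exact absurd rfl h

/-- `setl` + `test` + `je`: the arm where the byte is 0 is the arm `b ≤ a`. -/
theorem ge_of_setl {a b : Nat} (ha : a < 2 ^ 31) (hb : b < 2 ^ 31)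
    (h : (if (BitVec.ofNat 32 a).toInt < (BitVec.ofNat 32 b).toInt then 1 else 0 : BitVec 8).toNat = 0) : b ≤ a := by
  rw [toInt_small32 a ha, toInt_small32 b hb] at h
  split at h
  · exact absurd h (by decide)
  · omega

/-- What the stores into the scratch slots keep, besides the frame: every allocated block and the temp block. -/
structure Kept8 (g : G) (m m' : Mem) : Prop where
  /-- every allocated block reads the same -/
  all : AllKept g.Blk m m'
  /-- the temp block reads the same -/
  tb : g.TB.Kept m m'
  /-- the shadow is untouched -/
  shadow : ShadowUntouched m m'

/-- **Stores into the scratch slots keep every allocated block, the temp block and the shadow**: they all lie off the stack. -/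
theorem kept8_of_scratch {u₀ : State} {g : G} (he : Entered u₀ g) {v : State} (c : Common u₀ g v) {m' : Mem}
    (hs : Mem.SameExcept (scratch (g.e.reg .rsp).toNat) v.mem m') : Kept8 g v.mem m' := by
  have hroom := he.room
  have hlo : 0x700000 + 848 ≤ (g.e.reg .rsp).toNat := hroom.1
  have hhi : (g.e.reg .rsp).toNat + 8 ≤ 0x800000 := hroom.2
  have hok := he.pre.env.ok
  have hall : AllKept g.Blk v.mem m' :=
    AllKept.of_sameExcept hok hs (fun B hB => scratch_off hlo hhi (he.pre.free.offStack B hB))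
  have hb : ADOBusy g.A' g.others' v.mem g.f g.sz := c.point.busy
  have htr := hb.ok.tblock_range c.tblock
  have h1x := hb.ok.AR1x
  have h1 := hb.ok.AR1
  have hr8 := le_r8 g.TB.size
  have htb : g.TB.Kept v.mem m' := by
    apply Block.Kept.of_sameExcept hs
    · apply scratch_off hlo hhi
      omega
    · omega
  refine ⟨hall, htb, ?_⟩
  exact hs.eqOn 0xC00000 0xE00000 (scratch_off hlo hhi (Or.inr (by omega)))

/-- **COMMON after stores into the scratch slots**: the frame's constant slots miss the scratch windows, everything else
(`*f`, the arena, the temp block, the configuration, the shadow) lies off the stack. -/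
theorem common_scratch {u₀ : State} {g : G} (he : Entered u₀ g) {v v' : State} (c : Common u₀ g v)
    (hrbp : v'.reg .rbp = v.reg .rbp) (hrsp : v'.reg .rsp = v.reg .rsp)
    (hcode : CodeOK u₀ v'.mem) (hinv : abiInv v')
    (hs : Mem.SameExcept (scratch (g.e.reg .rsp).toNat) v.mem v'.mem) : Common u₀ g v' := by
  have hroom := he.room
  have hlo : 0x700000 + 848 ≤ (g.e.reg .rsp).toNat := hroom.1
  have hhi : (g.e.reg .rsp).toNat + 8 ≤ 0x800000 := hroom.2
  have hk := kept8_of_scratch he c hs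
  have hob : g.Blk (objBlock g.f) := he.vorbis.obj
  have hkobj := hk.all _ hob
  have hin := hkobj.inside
  simp only [vblock, voff] at hin
  have hb : ADOBusy g.A' g.others' v.mem g.f g.sz := c.point.busy
  have hsz := c.tb.size
  have h3 : g.C * (8 + 8 * g.PRD) = g.C * 8 + g.C * (8 * g.PRD) := Nat.mul_add _ _ _
  apply Common.of_frame he
  · rw [hrbp]
    exact c.rbp
  · rw [hrsp]
    exact c.rsp
  · exact hcode
  · exact hinv
  · rw [slot_keep hlo hhi hs 8 8 8 rfl (by omega) (by omega) (by omega)]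
    exact c.s_rbp
  · rw [slot_keep hlo hhi hs 16 16 8 rfl (by omega) (by omega) (by omega)]
    exact c.s_r15
  · rw [slot_keep hlo hhi hs 24 24 8 rfl (by omega) (by omega) (by omega)]
    exact c.s_r14
  · rw [slot_keep hlo hhi hs 32 32 8 rfl (by omega) (by omega) (by omega)]
    exact c.s_r13
  · rw [slot_keep hlo hhi hs 40 40 8 rfl (by omega) (by omega) (by omega)]
    exact c.s_r12
  · rw [slot_keep hlo hhi hs 48 48 8 rfl (by omega) (by omega) (by omega)]
    exact c.s_rbx
  · rw [slot_keep hlo hhi hs 184 184 8 rfl (by omega) (by omega) (by omega)]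
    exact c.fr_f
  · rw [slot_keep hlo hhi hs 216 216 8 rfl (by omega) (by omega) (by omega)]
    exact c.fr_rb
  · rw [slot_keep hlo hhi hs 156 156 4 rfl (by omega) (by omega) (by omega)]
    exact c.fr_ch
  · rw [slot_keep hlo hhi hs 196 196 4 rfl (by omega) (by omega) (by omega)]
    exact c.fr_prd
  · rw [slot_keep hlo hhi hs 200 200 4 rfl (by omega) (by omega) (by omega)]
    exact c.fr_w
  · rw [slot_keep hlo hhi hs 232 232 4 rfl (by omega) (by omega) (by omega)]
    exact c.fr_rtype
  · rw [slot_keep hlo hhi hs 176 176 8 rfl (by omega) (by omega) (by omega)]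
    exact c.fr_pcd
  · rw [slot_keep hlo hhi hs 240 240 8 rfl (by omega) (by omega) (by omega)]
    exact c.fr_si
  · -- the footprint: the scratch slots lie in the 848 bytes of stack
    apply c.same.step_same hs
    intro w hw a h1 h2
    refine ⟨⟨(g.e.reg .rsp).toNat - 848, (g.e.reg .rsp).toNat⟩, List.mem_cons_self, ?_⟩
    simp only [scratch, List.mem_cons, List.mem_nil_iff, or_false] at hw
    rcases hw with rfl | rfl | rfl | rfl | rfl
    · simp only [] at h1 h2 ⊢
      omega
    · simp only [] at h1 h2 ⊢
      omega
    · simp only [] at h1 h2 ⊢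
      omega
    · simp only [] at h1 h2 ⊢
      omega
    · simp only [] at h1 h2 ⊢
      omega
  · exact c.shadow.untouched hk.shadow
  · exact c.point.vorbis.bits.frame_fields (Bits.SameFields.of_same hkobj.same)
  · exact hb.transfer (ObjEq.of_kept_obj hkobj (by decide))
  · apply c.tb.frame
    apply hk.tb.mono
    · exact Nat.le_refl _
    · show g.TB.base + 8 * g.C ≤ g.TB.base + g.TB.size
      omega
  · rw [mu_frame_obj (by omega) hkobj.same]
    exact c.mu_le

/-- The numbers the branch conditions of the segment speak of are small: `1 ≤ W < 2^31` (R7b; `dimensions` is an `int`),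
`part_read ≤ 8192` (`part_read ≤ 2·n ≤ blocksize_1 ≤ 8192`), `tap = L < 2^32`. -/
theorem numbers8 {u₀ : State} {g : G} (he : Entered u₀ g) {v : State} (c : Common u₀ g v) :
    1 ≤ g.W ∧ g.W < 2 ^ 31 ∧ g.PRD ≤ 8192 ∧ g.tap < 2 ^ 32 := by
  have h1 := c.w_pos he
  have h2 : g.W < 2 ^ 31 := by
    unfold G.W Residue.W
    simp only [Codebook.dimensions]
    have := Mem.i32_range g.e.mem (Residue.cbk g.e.mem g.f g.r + Off.Codebook.dimensions)
    omega
  have h3 : g.PRD ≤ 8192 := by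
    have a1 := Residue.partReadDec_le g.e.mem g.f g.rn g.n
    have a2 := he.args.n_le
    have a3 := (he.vorbis.hd3).b1.facts
    unfold G.PRD
    omega
  have h4 : g.tap < 2 ^ 32 := by
    have := he.ado.ok.AR1
    unfold G.tap
    omega
  exact ⟨h1, h2, h3, h4⟩

/-- A path-B row is a row of the temp block: `j < ch ≤ C`. -/
theorem rowsB_lt {u₀ : State} {g : G} (he : Entered u₀ g) {j : Nat} (hj : g.rowsB j) : j < g.C := by
  have h1 : j < g.ch := hj.1
  have h2 : g.ch ≤ g.C := he.args.ch_le
  omega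

/-- **FILL after stores into the scratch slots**: the temp block, the record, the class book's header and the `classdata`
table all lie off the stack. -/
theorem fill_scratch {u₀ : State} {g : G} (he : Entered u₀ g) {v v' : State} (c : Common u₀ g v) (c' : Common u₀ g v')
    (hk : Kept8 g v.mem v'.mem) :
    ∀ j m, g.rowsB j → Fill v.mem g.f g.r g.TB g.C g.PRD j m → m ≤ g.PRD → Fill v'.mem g.f g.r g.TB g.C g.PRD j m := by
  intro j m hj hf hm
  have r := c.reads
  have r' := c'.reads
  have hrd : ResidueReads v.mem g.f v'.mem g.f g.r :=
    ⟨r'.begin.trans r.begin.symm, r'.end_.trans r.end_.symm, r'.part_size.trans r.part_size.symm,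
      r'.classifications.trans r.classifications.symm, r'.classbook.trans r.classbook.symm,
      r'.classdata.trans r.classdata.symm, r'.residue_books.trans r.residue_books.symm,
      r'.codebook_count.trans r.codebook_count.symm, r'.cbk.trans r.cbk.symm, r'.E.trans r.E.symm, r'.W.trans r.W.symm⟩
  have hcd := hk.all _ (c.resAt he).R8a
  exact hf.frame (rowsB_lt he hj) hm c.tb.size hk.tb hrd hcd

/-- The invariant of the i-loop 2278 after stores into the scratch slots. -/
theorem winner_scratch {u₀ : State} {g : G} (he : Entered u₀ g) {v v' : State} (c : Common u₀ g v) (c' : Common u₀ g v')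
    (hk : Kept8 g v.mem v'.mem) {pass cs i pcount : Nat}
    (h : WInnerInv v.mem g.f g.r g.TB g.C g.PRD g.W g.rowsB pass cs i pcount) :
    WInnerInv v'.mem g.f g.r g.TB g.C g.PRD g.W g.rowsB pass cs i pcount :=
  h.frame (fun _ hj => hj) (fill_scratch he c c' hk) (c.w_pos he)

/-- WB after stores into the scratch slots. -/
theorem winv_scratch {u₀ : State} {g : G} (he : Entered u₀ g) {v v' : State} (c : Common u₀ g v) (c' : Common u₀ g v')
    (hk : Kept8 g v.mem v'.mem) {pass cs pcount : Nat}
    (h : WInv v.mem g.f g.r g.TB g.C g.PRD g.W g.rowsB pass cs pcount) :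
    WInv v'.mem g.f g.r g.TB g.C g.PRD g.W g.rowsB pass cs pcount :=
  h.frame (fun _ hj => hj) (fill_scratch he c c' hk) (c.w_pos he)

/-- The record's address is an address: it fits a 64-bit register (an 8-byte spill reads back the same number). -/
theorem r_lt {u₀ : State} {g : G} (he : Entered u₀ g) : g.r < 2 ^ 64 := by
  have hR : ResidueOK g.Blk g.e.mem g.f := he.vorbis.residue
  have hin := he.pre.env.ok.inside _ hR.R2
  have hlt := he.args.rn_lt
  have h1 := hR.R1
  have hlt' : g.rn < (stb_vorbis.residue_count g.e.mem g.f).toNat := by omega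
  simp only [voff] at hin
  unfold G.r stb_vorbis.residue_config_at
  simp only [voff]
  omega

/-- **0x10eeba, the head of the pass loop 2257** (inside segment 8): `r9d = pass ≤ 8`, `r15 = r`, `[rbp−0xec] = tap`;
after a finished pass every row that matters is filled up to `KK`. -/
structure A6 (u₀ : State) (g : G) (pass : Nat) (v : State) : Prop where
  rip : v.rip = L.decode_residue.cut6
  common : Common u₀ g v
  pathB : g.rtype ≠ 2 ∨ g.ch = 1
  sl_dnd : UInt64.ofNat (v.mem.readLE (g.e.reg .rsp - 168) 8) = g.e.reg .r9
  sl_tap : v.mem.readLE (g.e.reg .rsp - 244) 4 = g.tap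
  pass_le : pass ≤ 8
  r9 : v.reg .r9 = Word.ofBV (BitVec.ofNat 32 pass)
  r15 : v.reg .r15 = UInt64.ofNat g.r
  fillK : 1 ≤ pass → ∀ j, g.rowsB j → Fill v.mem g.f g.r g.TB g.C g.PRD j (Res.ceilDiv g.PRD g.W)

/-- **0x10eed9, the head of the `while` 2259** (inside segment 8): `edx = pcount`, `r8d = pass ≤ 7`, `r14 = r`, WB. -/
structure A7 (u₀ : State) (g : G) (pass cs pcount : Nat) (v : State) : Prop where
  rip : v.rip = L.decode_residue.cut7
  common : Common u₀ g v
  path : PathB g cs v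
  pass_le : pass ≤ 7
  rdx : v.reg .rdx = Word.ofBV (BitVec.ofNat 32 pcount)
  r8 : v.reg .r8 = Word.ofBV (BitVec.ofNat 32 pass)
  r14 : v.reg .r14 = UInt64.ofNat g.r
  wb : WInv v.mem g.f g.r g.TB g.C g.PRD g.W g.rowsB pass cs pcount

/-- **0x10faa1, the head of the i-loop 2278** (inside segment 8): `r8d = i`, `edx = pcount`, `r15 = r`,
`[rbp−0xc8] = pass ≤ 7` (4 bytes), the invariant of the loop. -/
structure A35 (u₀ : State) (g : G) (pass cs i pcount : Nat) (v : State) : Prop where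
  rip : v.rip = L.decode_residue.cut35
  common : Common u₀ g v
  path : PathB g cs v
  pass_le : pass ≤ 7
  r8 : v.reg .r8 = Word.ofBV (BitVec.ofNat 32 i)
  rdx : v.reg .rdx = Word.ofBV (BitVec.ofNat 32 pcount)
  r15 : v.reg .r15 = UInt64.ofNat g.r
  sl_pass : v.mem.readLE (g.e.reg .rsp - 208) 4 = pass
  wi : WInnerInv v.mem g.f g.r g.TB g.C g.PRD g.W g.rowsB pass cs i pcount

/-- **Entry 1 (0x10eea8, from .2)**: `[rbp−0xec] := tap`, `r9d = pass = 0`, `r15 = r`: to the head of the pass loop. -/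
theorem entry1 (Lay : Layout) (hLay : Lay.hi = 0x1000000) (μ : Microarch) (hμ : UserX.MicroOK μ) (u₀ : State)
    (hcode : HasCodeNat Lay u₀ Vorbis.L.decode_residue.entry Vorbis.Code.code_decode_residue.nat Vorbis.L.decode_residue.size)
    (g : G) (hent : Entered u₀ g) (v : State) (hat : At5 u₀ g v) :
    ReachVia Lay μ WayInv v (fun v' => A6 u₀ g 0 v') := by
  have he := hent.entry
  v_entry he
  obtain ⟨hrip, c, pathB, h_r14, h_r15, sl_dnd⟩ := hat
  obtain ⟨hW1, hW31, hPRD, htap⟩ := numbers8 hent c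
  have w_rip := hrip
  have h_rsp := c.rsp
  have h_rbp := c.rbp
  have w_eq : Mem.EqOn Vorbis.L.textLo Vorbis.L.textHi u₀.mem v.mem := c.code
  have hdf : v.flags .df = false := (show abiInv _ from c.inv).1
  have hmx : v.mxcsr &&& 0x1F80 = 0x1F80 := (show abiInv _ from c.inv).2
  have hsse := Vorbis.sseOK_of_abiInv c.inv
  u_walk hcode [hμ.vendor] until [Vorbis.L.decode_residue.cut6] span [Vorbis.L.textLo, Vorbis.L.textHi] side (v_side)
  -- 0x10eeb7 → 0x10eeba: `[rbp−0xec] := tap`, `r9d = pass = 0`, `r15 = r`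
  have hs : Mem.SameExcept (scratch (g.e.reg .rsp).toNat) v.mem s_10eeb7.mem := by
    show Mem.SameExcept [⟨(g.e.reg .rsp).toNat - 248, (g.e.reg .rsp).toNat - 240⟩,
      ⟨(g.e.reg .rsp).toNat - 228, (g.e.reg .rsp).toNat - 224⟩, ⟨(g.e.reg .rsp).toNat - 208, (g.e.reg .rsp).toNat - 200⟩,
      ⟨(g.e.reg .rsp).toNat - 192, (g.e.reg .rsp).toNat - 188⟩, ⟨(g.e.reg .rsp).toNat - 160, (g.e.reg .rsp).toNat - 156⟩]
      v.mem s_10eeb7.mem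
    u_same
  have hinv : abiInv s_10eeb7 := by v_inv
  have c' : Common u₀ g s_10eeb7 := common_scratch hent c (w_kept .rbp rfl) (w_kept .rsp rfl) w_eq hinv hs
  have hk := kept8_of_scratch hent c hs
  have e1 : UInt64.ofNat (s_10eeb7.mem.readLE (g.e.reg .rsp - 168) 8) = g.e.reg .r9 := by u_resolve
  have e3 : s_10eeb7.mem.readLE (g.e.reg .rsp - 244) 4 = g.tap := by
    u_resolve
    rw [Asan.part32_toNat, UInt64.toNat_ofNat']
    omega
  refine ReachVia.done ⟨w_rip, c', pathB, e1, e3, by omega, w_r9, w_r15, ?_⟩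
  intro h0
  omega

/-- **Entry 2 (0x10f8f8, from .9: the j-loop 2261 is over)**: reload `pass = 0`, `pcount`, `r`; `[rbp−0xc8] := pass` (4 bytes,
over the spill of `r`), `i = 0`, `r15 = r`: to the head of the i-loop 2278. -/
theorem entry2 (Lay : Layout) (hLay : Lay.hi = 0x1000000) (μ : Microarch) (hμ : UserX.MicroOK μ) (u₀ : State)
    (hcode : HasCodeNat Lay u₀ Vorbis.L.decode_residue.entry Vorbis.Code.code_decode_residue.nat Vorbis.L.decode_residue.size)
    (g : G) (hent : Entered u₀ g) (cs pcount : Nat) (v : State) (hat : At29 u₀ g cs pcount v) :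
    ReachVia Lay μ WayInv v (fun v' => A35 u₀ g 0 cs 0 pcount v') := by
  have he := hent.entry
  v_entry he
  obtain ⟨hrip, c, path, sl_r, sl_pass, sl_pcount, wi⟩ := hat
  obtain ⟨hW1, hW31, hPRD, htap⟩ := numbers8 hent c
  have hpc_le := wi.inner.pcount_le
  have w_rip := hrip
  have h_rsp := c.rsp
  have h_rbp := c.rbp
  have w_eq : Mem.EqOn Vorbis.L.textLo Vorbis.L.textHi u₀.mem v.mem := c.code
  have hdf : v.flags .df = false := (show abiInv _ from c.inv).1
  have hmx : v.mxcsr &&& 0x1F80 = 0x1F80 := (show abiInv _ from c.inv).2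
  have hsse := Vorbis.sseOK_of_abiInv c.inv
  have sl_cs := path.sl_cs
  have sl_tap := path.sl_tap
  have sl_dnd := path.sl_dnd
  u_walk hcode [hμ.vendor] until [Vorbis.L.decode_residue.cut35] span [Vorbis.L.textLo, Vorbis.L.textHi] side (v_side)
  -- 0x10ef03 → 0x10faa1: `[rbp−0xc8] := pass = 0` (4 bytes, over the spill of `r`), `r8d = i = 0`, `r15 = r`
  have hs : Mem.SameExcept (scratch (g.e.reg .rsp).toNat) v.mem s_10ef03.mem := by
    show Mem.SameExcept [⟨(g.e.reg .rsp).toNat - 248, (g.e.reg .rsp).toNat - 240⟩,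
      ⟨(g.e.reg .rsp).toNat - 228, (g.e.reg .rsp).toNat - 224⟩, ⟨(g.e.reg .rsp).toNat - 208, (g.e.reg .rsp).toNat - 200⟩,
      ⟨(g.e.reg .rsp).toNat - 192, (g.e.reg .rsp).toNat - 188⟩, ⟨(g.e.reg .rsp).toNat - 160, (g.e.reg .rsp).toNat - 156⟩]
      v.mem s_10ef03.mem
    u_same
  have hinv : abiInv s_10ef03 := by v_inv
  have c' : Common u₀ g s_10ef03 := common_scratch hent c (w_kept .rbp rfl) (w_kept .rsp rfl) w_eq hinv hs
  have hk := kept8_of_scratch hent c hs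
  have e1 : UInt64.ofNat (s_10ef03.mem.readLE (g.e.reg .rsp - 168) 8) = g.e.reg .r9 := by u_resolve
  have e2 : s_10ef03.mem.readLE (g.e.reg .rsp - 160) 4 = cs := by u_resolve
  have e3 : s_10ef03.mem.readLE (g.e.reg .rsp - 244) 4 = g.tap := by u_resolve
  have e4 : s_10ef03.mem.readLE (g.e.reg .rsp - 208) 4 = 0 := by u_resolve
  refine ReachVia.done ⟨w_rip, c', ⟨path.pathB, e1, e2, e3⟩, by omega, w_r8, w_rdx, w_r15, e4,
    winner_scratch hent c c' hk wi⟩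

/-- **Entry 3 (0x10fa8d, from .10: the latch of the i-loop 2278)**: reload `i`, `pcount`; `++i, ++pcount`: to the head of
the i-loop with `WInnerInv.step`. -/
theorem entry3 (Lay : Layout) (hLay : Lay.hi = 0x1000000) (μ : Microarch) (hμ : UserX.MicroOK μ) (u₀ : State)
    (hcode : HasCodeNat Lay u₀ Vorbis.L.decode_residue.entry Vorbis.Code.code_decode_residue.nat Vorbis.L.decode_residue.size)
    (g : G) (hent : Entered u₀ g) (pass cs i pcount : Nat) (v : State) (hat : At34 u₀ g pass cs i pcount v) :
    ReachVia Lay μ WayInv v (fun v' => A35 u₀ g pass cs (i + 1) (pcount + 1) v') := by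
  have he := hent.entry
  v_entry he
  obtain ⟨hrip, c, path, pass_le, h_r15, sl_i, sl_pcount, sl_pass, i_lt, lt, wi⟩ := hat
  obtain ⟨hW1, hW31, hPRD, htap⟩ := numbers8 hent c
  have w_rip := hrip
  have h_rsp := c.rsp
  have h_rbp := c.rbp
  have w_eq : Mem.EqOn Vorbis.L.textLo Vorbis.L.textHi u₀.mem v.mem := c.code
  have hdf : v.flags .df = false := (show abiInv _ from c.inv).1
  have hmx : v.mxcsr &&& 0x1F80 = 0x1F80 := (show abiInv _ from c.inv).2
  have hsse := Vorbis.sseOK_of_abiInv c.inv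
  have sl_cs := path.sl_cs
  have sl_tap := path.sl_tap
  have sl_dnd := path.sl_dnd
  u_walk hcode [hμ.vendor] until [Vorbis.L.decode_residue.cut35] span [Vorbis.L.textLo, Vorbis.L.textHi] side (v_side)
  -- 0x10fa9e → 0x10faa1: the latch `++i, ++pcount`
  have hs : Mem.SameExcept (scratch (g.e.reg .rsp).toNat) v.mem s_10fa9e.mem := by
    show Mem.SameExcept [⟨(g.e.reg .rsp).toNat - 248, (g.e.reg .rsp).toNat - 240⟩,
      ⟨(g.e.reg .rsp).toNat - 228, (g.e.reg .rsp).toNat - 224⟩, ⟨(g.e.reg .rsp).toNat - 208, (g.e.reg .rsp).toNat - 200⟩,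
      ⟨(g.e.reg .rsp).toNat - 192, (g.e.reg .rsp).toNat - 188⟩, ⟨(g.e.reg .rsp).toNat - 160, (g.e.reg .rsp).toNat - 156⟩]
      v.mem s_10fa9e.mem
    u_same
  have hinv : abiInv s_10fa9e := by v_inv
  have c' : Common u₀ g s_10fa9e := common_scratch hent c (w_kept .rbp rfl) (w_kept .rsp rfl) w_eq hinv hs
  have hk := kept8_of_scratch hent c hs
  have e1 : UInt64.ofNat (s_10fa9e.mem.readLE (g.e.reg .rsp - 168) 8) = g.e.reg .r9 := by u_resolve
  have e2 : s_10fa9e.mem.readLE (g.e.reg .rsp - 160) 4 = cs := by u_resolve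
  have e3 : s_10fa9e.mem.readLE (g.e.reg .rsp - 244) 4 = g.tap := by u_resolve
  have e4 : s_10fa9e.mem.readLE (g.e.reg .rsp - 208) 4 = pass := by u_resolve
  refine ReachVia.done ⟨w_rip, c', ⟨path.pathB, e1, e2, e3⟩, pass_le, ?_, ?_, ?_, e4,
    winner_scratch hent c c' hk (wi.step i_lt lt)⟩
  · rw [w_r8, ofNat32_succ]
  · rw [w_rdx, ofNat32_succ]
  · rw [w_kept .r15 rfl]
    exact h_r15

/-- **From the head of the pass loop 2257 (0x10eeba)**: `pass > 7` → the trampoline (`At36`); else `class_set = pcount = 0`,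
`r8d = pass`, `r14 = r`, to the `while` head with WB at its start (`WInv.init0` / `WInv.initK`). -/
theorem head6 (Lay : Layout) (hLay : Lay.hi = 0x1000000) (μ : Microarch) (hμ : UserX.MicroOK μ) (u₀ : State)
    (hcode : HasCodeNat Lay u₀ Vorbis.L.decode_residue.entry Vorbis.Code.code_decode_residue.nat Vorbis.L.decode_residue.size)
    (g : G) (hent : Entered u₀ g) (pass : Nat) (v : State) (hat : A6 u₀ g pass v) :
    ReachVia Lay μ WayInv v (fun v' => At36 u₀ g v' ∨ (pass ≤ 7 ∧ A7 u₀ g pass 0 0 v')) := by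
  have he := hent.entry
  v_entry he
  obtain ⟨hrip, c, pathB, sl_dnd, sl_tap, pass_le, h_r9, h_r15, fillK⟩ := hat
  obtain ⟨hW1, hW31, hPRD, htap⟩ := numbers8 hent c
  have w_rip := hrip
  have h_rsp := c.rsp
  have h_rbp := c.rbp
  have w_eq : Mem.EqOn Vorbis.L.textLo Vorbis.L.textHi u₀.mem v.mem := c.code
  have hdf : v.flags .df = false := (show abiInv _ from c.inv).1
  have hmx : v.mxcsr &&& 0x1F80 = 0x1F80 := (show abiInv _ from c.inv).2
  have hsse := Vorbis.sseOK_of_abiInv c.inv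
  have hp31 : pass < 2 ^ 31 := by omega
  u_walk hcode [hμ.vendor] until [Vorbis.L.decode_residue.cut36, Vorbis.L.decode_residue.cut7] span [Vorbis.L.textLo, Vorbis.L.textHi] side (v_side)
  · -- 0x10eebe → 0x10fafc: `pass > 7`: the pass loop is over, to the trampoline
    have hs : Mem.SameExcept (scratch (g.e.reg .rsp).toNat) v.mem s_10eebe.mem := by
      show Mem.SameExcept [⟨(g.e.reg .rsp).toNat - 248, (g.e.reg .rsp).toNat - 240⟩,
        ⟨(g.e.reg .rsp).toNat - 228, (g.e.reg .rsp).toNat - 224⟩, ⟨(g.e.reg .rsp).toNat - 208, (g.e.reg .rsp).toNat - 200⟩,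
        ⟨(g.e.reg .rsp).toNat - 192, (g.e.reg .rsp).toNat - 188⟩, ⟨(g.e.reg .rsp).toNat - 160, (g.e.reg .rsp).toNat - 156⟩]
        v.mem s_10eebe.mem
      u_same
    have hinv : abiInv s_10eebe := by v_inv
    have c' : Common u₀ g s_10eebe := common_scratch hent c (w_kept .rbp rfl) (w_kept .rsp rfl) w_eq hinv hs
    have hk := kept8_of_scratch hent c hs
    have e1 : UInt64.ofNat (s_10eebe.mem.readLE (g.e.reg .rsp - 168) 8) = g.e.reg .r9 := by u_resolve
    have e3 : s_10eebe.mem.readLE (g.e.reg .rsp - 244) 4 = g.tap := by u_resolve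
    exact ReachVia.done (Or.inl ⟨w_rip, c', e3⟩)
  · -- 0x10eebe → 0x10eec4: `pass ≤ 7`: `class_set = pcount = 0`, `r8d = pass`, `r14 = r`, to the `while` head
    have hle : pass ≤ 7 := by
      have e7 : (7#32).toInt = ((7 : Nat) : Int) := toInt_small32 7 (by omega)
      rw [toInt_small32 pass hp31, e7] at hbr_10eebe
      omega
    have hs : Mem.SameExcept (scratch (g.e.reg .rsp).toNat) v.mem s_10eed6.mem := by
      show Mem.SameExcept [⟨(g.e.reg .rsp).toNat - 248, (g.e.reg .rsp).toNat - 240⟩,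
        ⟨(g.e.reg .rsp).toNat - 228, (g.e.reg .rsp).toNat - 224⟩, ⟨(g.e.reg .rsp).toNat - 208, (g.e.reg .rsp).toNat - 200⟩,
        ⟨(g.e.reg .rsp).toNat - 192, (g.e.reg .rsp).toNat - 188⟩, ⟨(g.e.reg .rsp).toNat - 160, (g.e.reg .rsp).toNat - 156⟩]
        v.mem s_10eed6.mem
      u_same
    have hinv : abiInv s_10eed6 := by v_inv
    have c' : Common u₀ g s_10eed6 := common_scratch hent c (w_kept .rbp rfl) (w_kept .rsp rfl) w_eq hinv hs
    have hk := kept8_of_scratch hent c hs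
    have e1 : UInt64.ofNat (s_10eed6.mem.readLE (g.e.reg .rsp - 168) 8) = g.e.reg .r9 := by u_resolve
    have e3 : s_10eed6.mem.readLE (g.e.reg .rsp - 244) 4 = g.tap := by u_resolve
    have e2 : s_10eed6.mem.readLE (g.e.reg .rsp - 160) 4 = 0 := by u_resolve
    have hwb : WInv s_10eed6.mem g.f g.r g.TB g.C g.PRD g.W g.rowsB pass 0 0 := by
      by_cases hp0 : pass = 0
      · rw [hp0]
        exact WInv.init0 _ _ _ _ _ _ _ _
      · have hp1 : 1 ≤ pass := by omega
        apply WInv.initK hp1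
        intro j hj
        exact fill_scratch hent c c' hk j _ hj (fillK hp1 j hj) (Res.ceilDiv_le_self hW1)
    refine ReachVia.done (Or.inr ⟨hle, w_rip, c', ⟨pathB, e1, e2, e3⟩, hle, w_rdx, w_r8, w_r14, hwb⟩)

/-- **From the head of the `while` 2259 (0x10eed9)**: `pcount ≥ part_read` → the latch of the pass loop (`r9d = pass + 1`,
every row that matters filled up to `KK`: `WInv.exit_fill`); else pass 0 → the hand-over to the j-loop 2261 (`At28`), a pass ≥ 1 →
`[rbp−0xc8] := pass`, `i = 0`, to the head of the i-loop 2278 (`WInv.enterK`). -/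
theorem head7 (Lay : Layout) (hLay : Lay.hi = 0x1000000) (μ : Microarch) (hμ : UserX.MicroOK μ) (u₀ : State)
    (hcode : HasCodeNat Lay u₀ Vorbis.L.decode_residue.entry Vorbis.Code.code_decode_residue.nat Vorbis.L.decode_residue.size)
    (g : G) (hent : Entered u₀ g) (pass cs pcount : Nat) (v : State) (hat : A7 u₀ g pass cs pcount v) :
    ReachVia Lay μ WayInv v (fun v' => (g.PRD ≤ pcount ∧ A6 u₀ g (pass + 1) v') ∨
      (pass = 0 ∧ At28 u₀ g cs pcount v') ∨ (1 ≤ pass ∧ A35 u₀ g pass cs 0 pcount v')) := by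
  have he := hent.entry
  v_entry he
  obtain ⟨hrip, c, path, pass_le, h_rdx, h_r8, h_r14, wb⟩ := hat
  obtain ⟨hW1, hW31, hPRD, htap⟩ := numbers8 hent c
  have hr64 := r_lt hent
  have hpc_le : pcount ≤ g.PRD := by
    have := wb.head
    unfold Res.WHead at this
    omega
  have w_rip := hrip
  have h_rsp := c.rsp
  have h_rbp := c.rbp
  have w_eq : Mem.EqOn Vorbis.L.textLo Vorbis.L.textHi u₀.mem v.mem := c.code
  have hdf : v.flags .df = false := (show abiInv _ from c.inv).1
  have hmx : v.mxcsr &&& 0x1F80 = 0x1F80 := (show abiInv _ from c.inv).2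
  have hsse := Vorbis.sseOK_of_abiInv c.inv
  have f_prd := c.fr_prd
  have f_f := c.fr_f
  have sl_cs := path.sl_cs
  have sl_tap := path.sl_tap
  have sl_dnd := path.sl_dnd
  have hp31 : pcount < 2 ^ 31 := by omega
  have hP31 : g.PRD < 2 ^ 31 := by omega
  u_walk hcode [hμ.vendor] until [Vorbis.L.decode_residue.cut6, Vorbis.L.decode_residue.cut28, Vorbis.L.decode_residue.cut35] span [Vorbis.L.textLo, Vorbis.L.textHi] side (v_side)
  · -- 0x10eee1 → 0x10faed: `pcount ≥ part_read`: the latch of the pass loop, `r9d = pass + 1`, to its head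
    have hge : g.PRD ≤ pcount := by
      rw [toInt_small32 pcount hp31, toInt_small32 g.PRD hP31] at hbr_10eee1
      omega
    have hs : Mem.SameExcept (scratch (g.e.reg .rsp).toNat) v.mem s_10faf7.mem := by
      show Mem.SameExcept [⟨(g.e.reg .rsp).toNat - 248, (g.e.reg .rsp).toNat - 240⟩,
        ⟨(g.e.reg .rsp).toNat - 228, (g.e.reg .rsp).toNat - 224⟩, ⟨(g.e.reg .rsp).toNat - 208, (g.e.reg .rsp).toNat - 200⟩,
        ⟨(g.e.reg .rsp).toNat - 192, (g.e.reg .rsp).toNat - 188⟩, ⟨(g.e.reg .rsp).toNat - 160, (g.e.reg .rsp).toNat - 156⟩]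
        v.mem s_10faf7.mem
      u_same
    have hinv : abiInv s_10faf7 := by v_inv
    have c' : Common u₀ g s_10faf7 := common_scratch hent c (w_kept .rbp rfl) (w_kept .rsp rfl) w_eq hinv hs
    have hk := kept8_of_scratch hent c hs
    have e1 : UInt64.ofNat (s_10faf7.mem.readLE (g.e.reg .rsp - 168) 8) = g.e.reg .r9 := by u_resolve
    have e2 : s_10faf7.mem.readLE (g.e.reg .rsp - 160) 4 = cs := by u_resolve
    have e3 : s_10faf7.mem.readLE (g.e.reg .rsp - 244) 4 = g.tap := by u_resolve
    refine ReachVia.done (Or.inl ⟨hge, w_rip, c', path.pathB, e1, e3, by omega, ?_, w_r15, ?_⟩)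
    · rw [w_r9, ofNat32_succ]
    · intro _ j hj
      exact fill_scratch hent c c' hk j _ hj (wb.exit_fill hW1 hge j hj) (Res.ceilDiv_le_self hW1)
  · -- 0x10eeea → 0x10f8d5: pass 0, `pcount < part_read`: the hand-over to the j-loop 2261
    have hlt : pcount < g.PRD := by
      rw [toInt_small32 pcount hp31, toInt_small32 g.PRD hP31] at hbr_10eee1
      omega
    have hp0 : pass = 0 := by omega
    subst hp0
    have hs : Mem.SameExcept (scratch (g.e.reg .rsp).toNat) v.mem s_10f8f3.mem := by
      show Mem.SameExcept [⟨(g.e.reg .rsp).toNat - 248, (g.e.reg .rsp).toNat - 240⟩,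
        ⟨(g.e.reg .rsp).toNat - 228, (g.e.reg .rsp).toNat - 224⟩, ⟨(g.e.reg .rsp).toNat - 208, (g.e.reg .rsp).toNat - 200⟩,
        ⟨(g.e.reg .rsp).toNat - 192, (g.e.reg .rsp).toNat - 188⟩, ⟨(g.e.reg .rsp).toNat - 160, (g.e.reg .rsp).toNat - 156⟩]
        v.mem s_10f8f3.mem
      u_same
    have hinv : abiInv s_10f8f3 := by v_inv
    have c' : Common u₀ g s_10f8f3 := common_scratch hent c (w_kept .rbp rfl) (w_kept .rsp rfl) w_eq hinv hs
    have hk := kept8_of_scratch hent c hs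
    have e1 : UInt64.ofNat (s_10f8f3.mem.readLE (g.e.reg .rsp - 168) 8) = g.e.reg .r9 := by u_resolve
    have e2 : s_10f8f3.mem.readLE (g.e.reg .rsp - 160) 4 = cs := by u_resolve
    have e3 : s_10f8f3.mem.readLE (g.e.reg .rsp - 244) 4 = g.tap := by u_resolve
    have e4 : s_10f8f3.mem.readLE (g.e.reg .rsp - 208) 8 = g.r := by
      u_resolve
      rw [UInt64.toNat_ofNat']
      exact Nat.mod_eq_of_lt hr64
    have e5 : s_10f8f3.mem.readLE (g.e.reg .rsp - 228) 4 = 0 := by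
      u_resolve
      exact stored32 0 (by omega)
    have e6 : s_10f8f3.mem.readLE (g.e.reg .rsp - 248) 4 = pcount := by
      u_resolve
      exact stored32 pcount (by omega)
    refine ReachVia.done (Or.inr (Or.inl ⟨rfl, w_rip, c', ⟨path.pathB, e1, e2, e3⟩, w_r12, e4, e5, e6,
      winv_scratch hent c c' hk wb, hlt, ⟨0, Nat.zero_le _, w_r15, ?_⟩⟩))
    intro j' hj'
    exact absurd hj' (Nat.not_lt_zero j')
  · -- 0x10eeea → 0x10eef0: a pass ≥ 1, `pcount < part_read`: `[rbp−0xc8] := pass`, `i = 0`, to the head of the i-loop 2278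
    have hlt : pcount < g.PRD := by
      rw [toInt_small32 pcount hp31, toInt_small32 g.PRD hP31] at hbr_10eee1
      omega
    have hp1 : 1 ≤ pass := by omega
    have hs : Mem.SameExcept (scratch (g.e.reg .rsp).toNat) v.mem s_10ef03.mem := by
      show Mem.SameExcept [⟨(g.e.reg .rsp).toNat - 248, (g.e.reg .rsp).toNat - 240⟩,
        ⟨(g.e.reg .rsp).toNat - 228, (g.e.reg .rsp).toNat - 224⟩, ⟨(g.e.reg .rsp).toNat - 208, (g.e.reg .rsp).toNat - 200⟩,
        ⟨(g.e.reg .rsp).toNat - 192, (g.e.reg .rsp).toNat - 188⟩, ⟨(g.e.reg .rsp).toNat - 160, (g.e.reg .rsp).toNat - 156⟩]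
        v.mem s_10ef03.mem
      u_same
    have hinv : abiInv s_10ef03 := by v_inv
    have c' : Common u₀ g s_10ef03 := common_scratch hent c (w_kept .rbp rfl) (w_kept .rsp rfl) w_eq hinv hs
    have hk := kept8_of_scratch hent c hs
    have e1 : UInt64.ofNat (s_10ef03.mem.readLE (g.e.reg .rsp - 168) 8) = g.e.reg .r9 := by u_resolve
    have e2 : s_10ef03.mem.readLE (g.e.reg .rsp - 160) 4 = cs := by u_resolve
    have e3 : s_10ef03.mem.readLE (g.e.reg .rsp - 244) 4 = g.tap := by u_resolve
    have e4 : s_10ef03.mem.readLE (g.e.reg .rsp - 208) 4 = pass := by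
      u_resolve
      exact stored32 pass (by omega)
    refine ReachVia.done (Or.inr (Or.inr ⟨hp1, w_rip, c', ⟨path.pathB, e1, e2, e3⟩, pass_le, w_r8, ?_, w_r15, e4,
      winner_scratch hent c c' hk (wb.enterK hp1 hlt)⟩))
    rw [w_kept .rdx rfl]
    exact h_rdx

/-- **From the head of the i-loop 2278 (0x10faa1)**: `i < classwords ∧ pcount < part_read` → `ebx = j = 0`, spill `i` and
`pcount`, into the j-loop 2279 (`At30`); else → 0x10fad7: `r8d := pass`, `r14 := r`, `++class_set`, to the `while` head with WB
for `class_set + 1` (`WInnerInv.leave`). -/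
theorem head35 (Lay : Layout) (hLay : Lay.hi = 0x1000000) (μ : Microarch) (hμ : UserX.MicroOK μ) (u₀ : State)
    (hcode : HasCodeNat Lay u₀ Vorbis.L.decode_residue.entry Vorbis.Code.code_decode_residue.nat Vorbis.L.decode_residue.size)
    (g : G) (hent : Entered u₀ g) (pass cs i pcount : Nat) (v : State) (hat : A35 u₀ g pass cs i pcount v) :
    ReachVia Lay μ WayInv v (fun v' => At30 u₀ g pass cs i pcount v' ∨
      ((g.W ≤ i ∨ g.PRD ≤ pcount) ∧ A7 u₀ g pass (cs + 1) pcount v')) := by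
  have he := hent.entry
  v_entry he
  obtain ⟨hrip, c, path, pass_le, h_r8, h_rdx, h_r15, sl_pass, wi⟩ := hat
  obtain ⟨hW1, hW31, hPRD, htap⟩ := numbers8 hent c
  have hi_le := wi.inner.i_le
  have hpc_le := wi.inner.pcount_le
  have hcs_lt := wi.slot_lt hW1
  have w_rip := hrip
  have h_rsp := c.rsp
  have h_rbp := c.rbp
  have w_eq : Mem.EqOn Vorbis.L.textLo Vorbis.L.textHi u₀.mem v.mem := c.code
  have hdf : v.flags .df = false := (show abiInv _ from c.inv).1
  have hmx : v.mxcsr &&& 0x1F80 = 0x1F80 := (show abiInv _ from c.inv).2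
  have hsse := Vorbis.sseOK_of_abiInv c.inv
  have f_w := c.fr_w
  have f_prd := c.fr_prd
  have sl_cs := path.sl_cs
  have sl_tap := path.sl_tap
  have sl_dnd := path.sl_dnd
  have hi31 : i < 2 ^ 31 := by omega
  have hp31 : pcount < 2 ^ 31 := by omega
  have hP31 : g.PRD < 2 ^ 31 := by omega
  u_walk hcode [hμ.vendor] until [Vorbis.L.decode_residue.cut30, Vorbis.L.decode_residue.cut7] span [Vorbis.L.textLo, Vorbis.L.textHi] side (v_side)
  · -- 0x10faba → 0x10fad7: `i ≥ W`: `++class_set`, to the `while` head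
    have hex : g.W ≤ i ∨ g.PRD ≤ pcount := by
      first
        | exact Or.inr (ge_of_setl hp31 hP31 hbr_10fabe)
        | exact Or.inl (ge_of_setl hi31 hW31 hbr_10faba)
    have hs : Mem.SameExcept (scratch (g.e.reg .rsp).toNat) v.mem s_10fae8.mem := by
      show Mem.SameExcept [⟨(g.e.reg .rsp).toNat - 248, (g.e.reg .rsp).toNat - 240⟩,
        ⟨(g.e.reg .rsp).toNat - 228, (g.e.reg .rsp).toNat - 224⟩, ⟨(g.e.reg .rsp).toNat - 208, (g.e.reg .rsp).toNat - 200⟩,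
        ⟨(g.e.reg .rsp).toNat - 192, (g.e.reg .rsp).toNat - 188⟩, ⟨(g.e.reg .rsp).toNat - 160, (g.e.reg .rsp).toNat - 156⟩]
        v.mem s_10fae8.mem
      u_same
    have hinv : abiInv s_10fae8 := by v_inv
    have c' : Common u₀ g s_10fae8 := common_scratch hent c (w_kept .rbp rfl) (w_kept .rsp rfl) w_eq hinv hs
    have hk := kept8_of_scratch hent c hs
    have e1 : UInt64.ofNat (s_10fae8.mem.readLE (g.e.reg .rsp - 168) 8) = g.e.reg .r9 := by u_resolve
    have e2 : s_10fae8.mem.readLE (g.e.reg .rsp - 160) 4 = cs + 1 := by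
      u_resolve
      rw [ofNat32_succ]
      exact stored32 (cs + 1) (by omega)
    have e3 : s_10fae8.mem.readLE (g.e.reg .rsp - 244) 4 = g.tap := by u_resolve
    refine ReachVia.done (Or.inr ⟨hex, w_rip, c', ⟨path.pathB, e1, e2, e3⟩, pass_le, ?_, w_r8, w_r14,
      winv_scratch hent c c' hk (wi.leave hW1 hex)⟩)
    rw [w_kept .rdx rfl]
    exact h_rdx
  · -- 0x10fabe → 0x10fad7: `pcount ≥ part_read`: `++class_set`, to the `while` head
    have hex : g.W ≤ i ∨ g.PRD ≤ pcount := by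
      first
        | exact Or.inr (ge_of_setl hp31 hP31 hbr_10fabe)
        | exact Or.inl (ge_of_setl hi31 hW31 hbr_10faba)
    have hs : Mem.SameExcept (scratch (g.e.reg .rsp).toNat) v.mem s_10fae8.mem := by
      show Mem.SameExcept [⟨(g.e.reg .rsp).toNat - 248, (g.e.reg .rsp).toNat - 240⟩,
        ⟨(g.e.reg .rsp).toNat - 228, (g.e.reg .rsp).toNat - 224⟩, ⟨(g.e.reg .rsp).toNat - 208, (g.e.reg .rsp).toNat - 200⟩,
        ⟨(g.e.reg .rsp).toNat - 192, (g.e.reg .rsp).toNat - 188⟩, ⟨(g.e.reg .rsp).toNat - 160, (g.e.reg .rsp).toNat - 156⟩]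
        v.mem s_10fae8.mem
      u_same
    have hinv : abiInv s_10fae8 := by v_inv
    have c' : Common u₀ g s_10fae8 := common_scratch hent c (w_kept .rbp rfl) (w_kept .rsp rfl) w_eq hinv hs
    have hk := kept8_of_scratch hent c hs
    have e1 : UInt64.ofNat (s_10fae8.mem.readLE (g.e.reg .rsp - 168) 8) = g.e.reg .r9 := by u_resolve
    have e2 : s_10fae8.mem.readLE (g.e.reg .rsp - 160) 4 = cs + 1 := by
      u_resolve
      rw [ofNat32_succ]
      exact stored32 (cs + 1) (by omega)
    have e3 : s_10fae8.mem.readLE (g.e.reg .rsp - 244) 4 = g.tap := by u_resolve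
    refine ReachVia.done (Or.inr ⟨hex, w_rip, c', ⟨path.pathB, e1, e2, e3⟩, pass_le, ?_, w_r8, w_r14,
      winv_scratch hent c c' hk (wi.leave hW1 hex)⟩)
    rw [w_kept .rdx rfl]
    exact h_rdx
  · -- 0x10fad2 → 0x10f914: into the body, `i < W`, `pcount < part_read`
    have hi : i < g.W := lt_of_setl hi31 hW31 hbr_10faba
    have hp : pcount < g.PRD := lt_of_setl hp31 hP31 hbr_10fabe
    have hs : Mem.SameExcept (scratch (g.e.reg .rsp).toNat) v.mem s_10fad2.mem := by
      show Mem.SameExcept [⟨(g.e.reg .rsp).toNat - 248, (g.e.reg .rsp).toNat - 240⟩,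
        ⟨(g.e.reg .rsp).toNat - 228, (g.e.reg .rsp).toNat - 224⟩, ⟨(g.e.reg .rsp).toNat - 208, (g.e.reg .rsp).toNat - 200⟩,
        ⟨(g.e.reg .rsp).toNat - 192, (g.e.reg .rsp).toNat - 188⟩, ⟨(g.e.reg .rsp).toNat - 160, (g.e.reg .rsp).toNat - 156⟩]
        v.mem s_10fad2.mem
      u_same
    have hinv : abiInv s_10fad2 := by v_inv
    have c' : Common u₀ g s_10fad2 := common_scratch hent c (w_kept .rbp rfl) (w_kept .rsp rfl) w_eq hinv hs
    have hk := kept8_of_scratch hent c hs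
    have e1 : UInt64.ofNat (s_10fad2.mem.readLE (g.e.reg .rsp - 168) 8) = g.e.reg .r9 := by u_resolve
    have e2 : s_10fad2.mem.readLE (g.e.reg .rsp - 160) 4 = cs := by u_resolve
    have e3 : s_10fad2.mem.readLE (g.e.reg .rsp - 244) 4 = g.tap := by u_resolve
    have e4 : s_10fad2.mem.readLE (g.e.reg .rsp - 192) 4 = i := by
      u_resolve
      exact stored32 i (by omega)
    have e5 : s_10fad2.mem.readLE (g.e.reg .rsp - 228) 4 = pcount := by
      u_resolve
      exact stored32 pcount (by omega)
    have e6 : s_10fad2.mem.readLE (g.e.reg .rsp - 208) 4 = pass := by u_resolve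
    refine ReachVia.done (Or.inl ⟨w_rip, c', ⟨⟨path.pathB, e1, e2, e3⟩, pass_le, ?_, e4, e5, e6, hi, hp,
      winner_scratch hent c c' hk wi⟩, ⟨0, Nat.zero_le _, w_rbx⟩⟩)
    rw [w_kept .r15 rfl]
    exact h_r15

end Vorbis.Spec.decode_residue_8
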